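-- pv_equiv track=rewrite | github.com/academic-termfun29/Zenith-ACAD | zenith.app.py | sanitize_pdf_text
-- ===== SOURCE A (Python) =====
-- def sanitize_pdf_text(text: str | None) -> str:
--     if text is None:
--         return "-"
--     sanitized = str(text)
--     replacements = {
--         "&": "&amp;",
--         "<": "&lt;",
--         ">": "&gt;",
--         "\r\n": "\n",
--     }
--     for old, new in replacements.items():
--         sanitized = sanitized.replace(old, new)
--     return sanitized
-- ===== SOURCE B (Python) =====
-- def sanitize_pdf_text(text: str | None) -> str:
--     if text is None:
--         return "-"
--     s = str(text)
--     out = []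
--     i = 0
--     n = len(s)
--     while i < n:
--         c = s[i]
--         if c == "&":
--             out.append("&amp;")
--             i += 1
--         elif c == "<":
--             out.append("&lt;")
--             i += 1
--         elif c == ">":
--             out.append("&gt;")
--             i += 1
--         elif c == "\r" and i + 1 < n and s[i + 1] == "\n":
--             out.append("\n")
--             i += 2
--         else:
--             out.append(c)
--             i += 1
--     return "".join(out)
-- ===== Notes on version B (the rewrite author's own statement) =====
-- stated objective: alternative
-- what changed: A makes four sequential .replace passes over the string (one per pattern); B builds the result in a single left-to-right scan with a one-character lookahead that consumes a CR-LF pair as one unit.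
import Mathlib
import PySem

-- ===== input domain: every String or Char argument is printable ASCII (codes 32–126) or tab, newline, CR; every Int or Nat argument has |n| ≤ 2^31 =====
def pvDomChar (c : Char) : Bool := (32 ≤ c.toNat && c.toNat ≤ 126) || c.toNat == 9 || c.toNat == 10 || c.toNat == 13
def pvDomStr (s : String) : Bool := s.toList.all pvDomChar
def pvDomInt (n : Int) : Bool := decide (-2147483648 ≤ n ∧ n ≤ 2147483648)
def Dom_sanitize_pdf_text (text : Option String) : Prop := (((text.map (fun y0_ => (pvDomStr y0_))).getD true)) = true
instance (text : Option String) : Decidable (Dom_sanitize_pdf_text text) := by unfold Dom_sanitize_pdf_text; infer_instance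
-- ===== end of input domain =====

-- B replaces A's four sequential .replace passes by one left-to-right scan with a one-character
-- lookahead for "\r\n" (alternative decomposition, same cost).

-- ===== PORT A =====
-- A: str(text) then four .replace passes in dict order: "&", "<", ">", "\r\n".
def sanitize_pdf_text (text : Option String) : String :=
  match text with
  | none => "-"
  | some t =>
    let s1 := PySem.Str.replace t "&" "&amp;"
    let s2 := PySem.Str.replace s1 "<" "&lt;"
    let s3 := PySem.Str.replace s2 ">" "&gt;"
    PySem.Str.replace s3 "\r\n" "\n"

-- ===== PORT B =====
-- B: the per-character entity table of B's if/elif chain.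
def escChar (c : Char) : List Char :=
  if c = '&' then ['&', 'a', 'm', 'p', ';']
  else if c = '<' then ['&', 'l', 't', ';']
  else if c = '>' then ['&', 'g', 't', ';']
  else [c]

-- B: the single scan; the "\r" branch looks one character ahead and consumes two on "\r\n".
def sanitizeScan : List Char → List Char
  | [] => []
  | '\r' :: '\n' :: t => '\n' :: sanitizeScan t
  | c :: t => escChar c ++ sanitizeScan t

def sanitize_pdf_text_alt (text : Option String) : String :=
  match text with
  | none => "-"
  | some t => String.ofList (sanitizeScan t.toList)

-- ===== PRECONDITION & SPEC =====
def Spec_sanitize_pdf_text (text : Option String) (out : String) : Prop := out = sanitize_pdf_text_alt text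
instance (text : Option String) (out : String) : Decidable (Spec_sanitize_pdf_text text out) := by unfold Spec_sanitize_pdf_text; infer_instance

-- ===== CLAIM (what is proved, stated in full; the proofs are below) =====
def Claim_equal_sanitize_pdf_text : Prop := ∀ (text : Option String), Dom_sanitize_pdf_text text → Spec_sanitize_pdf_text text (sanitize_pdf_text text)

-- ===== LEMMAS AND PROOFS =====

-- the "\r\n" -> "\n" pass as a structural recursion
def crlfRep : List Char → List Char
  | [] => []
  | [c] => [c]
  | a :: b :: t => if a = '\r' ∧ b = '\n' then '\n' :: crlfRep t else a :: crlfRep (b :: t)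

lemma go_acc (old new : List Char) :
    ∀ (fuel : Nat) (l acc : List Char),
      PySem.Chars.replace.go old new fuel l acc = acc.reverse ++ PySem.Chars.replace.go old new fuel l [] := by
  intro fuel
  induction fuel with
  | zero => intro l acc; rw [PySem.Chars.replace.go, PySem.Chars.replace.go]; simp
  | succ f ih =>
    intro l acc
    cases l with
    | nil =>
      rw [PySem.Chars.replace.go, PySem.Chars.replace.go]
      simp
      all_goals omega
    | cons c t =>
      rw [PySem.Chars.replace.go]
      conv_rhs => rw [PySem.Chars.replace.go]
      by_cases h : old.isPrefixOf (c :: t)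
      · simp only [h, if_true]
        rw [ih _ (new.reverse ++ acc), ih _ (new.reverse ++ [])]
        simp
      · simp only [h]
        rw [ih t (c :: acc), ih t (c :: [])]
        simp

lemma go_single (c : Char) (r : List Char) :
    ∀ (l : List Char) (fuel : Nat), l.length ≤ fuel →
      PySem.Chars.replace.go [c] r fuel l [] = l.flatMap (fun x => if x = c then r else [x]) := by
  intro l
  induction l with
  | nil =>
    intro fuel _
    cases fuel with
    | zero => rw [PySem.Chars.replace.go]; simp
    | succ f =>
      rw [PySem.Chars.replace.go]
      simp
      all_goals omega
  | cons x t ih =>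
    intro fuel hf
    cases fuel with
    | zero => simp at hf
    | succ f =>
      rw [PySem.Chars.replace.go]
      by_cases hx : x = c
      · subst hx
        have hpre : List.isPrefixOf [x] (x :: t) = true := by
          simp [List.isPrefixOf]
        simp only [hpre, if_true, List.length_cons, List.length_nil,
          List.drop_succ_cons, List.drop_zero]
        rw [go_acc]
        rw [ih f (by simpa using Nat.le_of_succ_le_succ hf)]
        simp
      · have hpre : List.isPrefixOf [c] (x :: t) = false := by
          simp [List.isPrefixOf]
          intro h; exact absurd h.symm hx
        simp only [hpre, Bool.false_eq_true, if_false]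
        rw [go_acc]
        rw [ih f (Nat.le_of_succ_le_succ hf)]
        simp [hx]

lemma replace_single (c : Char) (r l : List Char) :
    PySem.Chars.replace l [c] r = l.flatMap (fun x => if x = c then r else [x]) := by
  rw [PySem.Chars.replace]
  simp only [List.isEmpty_cons, Bool.false_eq_true, if_false]
  exact go_single c r l l.length (Nat.le_refl _)

lemma go_crlf :
    ∀ (l : List Char) (fuel : Nat), l.length ≤ fuel →
      PySem.Chars.replace.go ['\r', '\n'] ['\n'] fuel l [] = crlfRep l := by
  intro l
  induction l using crlfRep.induct with
  | case1 =>
    intro fuel _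
    cases fuel with
    | zero => rw [PySem.Chars.replace.go]; simp [crlfRep]
    | succ f =>
      rw [PySem.Chars.replace.go]
      simp [crlfRep]
      all_goals omega
  | case2 c =>
    intro fuel hf
    cases fuel with
    | zero => simp at hf
    | succ f =>
      rw [PySem.Chars.replace.go]
      have hpre : List.isPrefixOf ['\r', '\n'] [c] = false := by
        simp [List.isPrefixOf]
      simp only [hpre, Bool.false_eq_true, if_false]
      rw [go_acc]
      cases f with
      | zero => rw [PySem.Chars.replace.go]; simp [crlfRep]
      | succ f' =>
        rw [PySem.Chars.replace.go]
        simp [crlfRep]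
        all_goals omega
  | case3 a b t hab ih =>
    intro fuel hf
    obtain ⟨ha, hb⟩ := hab
    subst ha; subst hb
    cases fuel with
    | zero => simp at hf
    | succ f =>
      rw [PySem.Chars.replace.go]
      have hpre : List.isPrefixOf ['\r', '\n'] ('\r' :: '\n' :: t) = true := by
        simp [List.isPrefixOf]
      simp only [hpre, if_true, List.length_cons, List.length_nil,
        List.drop_succ_cons, List.drop_zero]
      rw [go_acc]
      rw [ih f (by simp at hf; omega)]
      simp [crlfRep]
  | case4 a b t hab ih =>
    intro fuel hf
    cases fuel with
    | zero => simp at hf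
    | succ f =>
      rw [PySem.Chars.replace.go]
      have hpre : List.isPrefixOf ['\r', '\n'] (a :: b :: t) = false := by
        simp [List.isPrefixOf]
        intro h1 h2
        exact hab ⟨h1.symm, h2.symm⟩
      simp only [hpre, Bool.false_eq_true, if_false]
      rw [go_acc]
      rw [ih f (by simp at hf ⊢; omega)]
      simp [crlfRep, hab]

lemma replace_crlf (l : List Char) :
    PySem.Chars.replace l ['\r', '\n'] ['\n'] = crlfRep l := by
  rw [PySem.Chars.replace]
  simp only [List.isEmpty_cons, Bool.false_eq_true, if_false]
  exact go_crlf l l.length (Nat.le_refl _)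

lemma chain_esc (l : List Char) :
    ((l.flatMap (fun x => if x = '&' then ['&','a','m','p',';'] else [x])).flatMap
        (fun x => if x = '<' then ['&','l','t',';'] else [x])).flatMap
        (fun x => if x = '>' then ['&','g','t',';'] else [x]) = l.flatMap escChar := by
  induction l with
  | nil => rfl
  | cons c t ih =>
    simp only [List.flatMap_cons, List.flatMap_append]
    rw [ih]
    congr 1
    by_cases h1 : c = '&'
    · subst h1; rfl
    · by_cases h2 : c = '<'
      · subst h2; rfl
      · by_cases h3 : c = '>'
        · subst h3; rfl
        · simp [escChar, h1, h2, h3]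

lemma crlfRep_cons_ne (x : Char) (l : List Char) (h : x ≠ '\r') :
    crlfRep (x :: l) = x :: crlfRep l := by
  cases l with
  | nil => rfl
  | cons b t => simp [crlfRep, h]

lemma crlfRep_cr (l : List Char) (h : l.head? ≠ some '\n') :
    crlfRep ('\r' :: l) = '\r' :: crlfRep l := by
  cases l with
  | nil => rfl
  | cons b t =>
    have hb : b ≠ '\n' := by simpa using h
    simp [crlfRep, hb]

lemma head_flatMap_esc (t : List Char) (h : t.head? ≠ some '\n') :
    (t.flatMap escChar).head? ≠ some '\n' := by
  cases t with
  | nil => simp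
  | cons x t' =>
    have hx : x ≠ '\n' := by simpa using h
    simp only [List.flatMap_cons]
    by_cases h1 : x = '&'
    · subst h1; simp [escChar]
    · by_cases h2 : x = '<'
      · subst h2; simp [escChar]
      · by_cases h3 : x = '>'
        · subst h3; simp [escChar]
        · simp [escChar, h1, h2, h3, hx]

lemma crlfRep_esc_append (c : Char) (l : List Char) (hc : c ≠ '\r') :
    crlfRep (escChar c ++ l) = escChar c ++ crlfRep l := by
  by_cases h1 : c = '&'
  · subst h1
    rw [show escChar '&' = ['&', 'a', 'm', 'p', ';'] from rfl]
    simp only [List.cons_append, List.nil_append]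
    rw [crlfRep_cons_ne _ _ (by decide), crlfRep_cons_ne _ _ (by decide),
        crlfRep_cons_ne _ _ (by decide), crlfRep_cons_ne _ _ (by decide),
        crlfRep_cons_ne _ _ (by decide)]
  · by_cases h2 : c = '<'
    · subst h2
      rw [show escChar '<' = ['&', 'l', 't', ';'] from rfl]
      simp only [List.cons_append, List.nil_append]
      rw [crlfRep_cons_ne _ _ (by decide), crlfRep_cons_ne _ _ (by decide),
          crlfRep_cons_ne _ _ (by decide), crlfRep_cons_ne _ _ (by decide)]
    · by_cases h3 : c = '>'
      · subst h3
        rw [show escChar '>' = ['&', 'g', 't', ';'] from rfl]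
        simp only [List.cons_append, List.nil_append]
        rw [crlfRep_cons_ne _ _ (by decide), crlfRep_cons_ne _ _ (by decide),
            crlfRep_cons_ne _ _ (by decide), crlfRep_cons_ne _ _ (by decide)]
      · rw [show escChar c = [c] by simp [escChar, h1, h2, h3]]
        simp only [List.cons_append, List.nil_append]
        rw [crlfRep_cons_ne c l hc]

lemma crlf_of_esc (l : List Char) : crlfRep (l.flatMap escChar) = sanitizeScan l := by
  induction l using sanitizeScan.induct with
  | case1 => rfl
  | case2 t ih =>
    rw [show ('\r' :: '\n' :: t).flatMap escChar = '\r' :: '\n' :: t.flatMap escChar by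
      simp only [List.flatMap_cons]; rfl]
    rw [show crlfRep ('\r' :: '\n' :: t.flatMap escChar) = '\n' :: crlfRep (t.flatMap escChar) by
      simp [crlfRep]]
    rw [ih, sanitizeScan]
  | case3 c t hne ih =>
    simp only [List.flatMap_cons]
    by_cases hc : c = '\r'
    · subst hc
      have ht : t.head? ≠ some '\n' := by
        cases t with
        | nil => simp
        | cons b t' =>
          simp only [List.head?_cons, ne_eq, Option.some.injEq]
          intro hb; subst hb; exact hne t' rfl rfl
      rw [show escChar '\r' = ['\r'] from rfl]
      simp only [List.cons_append, List.nil_append]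
      rw [crlfRep_cr _ (head_flatMap_esc t ht), ih]
      rw [sanitizeScan.eq_3 _ _ hne]
      rfl
    · rw [crlfRep_esc_append c _ hc, ih]
      rw [sanitizeScan.eq_3 _ _ hne]

-- ===== VERDICT (by name: the statement is the Claim_ definition above) =====
theorem sanitize_pdf_text_spec : Claim_equal_sanitize_pdf_text := by
  intro text _
  unfold Spec_sanitize_pdf_text
  cases text with
  | none => rfl
  | some t =>
    show (PySem.Str.replace (PySem.Str.replace (PySem.Str.replace (PySem.Str.replace t "&" "&amp;") "<" "&lt;") ">" "&gt;") "\r\n" "\n") = String.ofList (sanitizeScan t.toList)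
    simp only [PySem.Str.replace, String.toList_ofList]
    rw [show ("&".toList) = ['&'] from rfl, show ("&amp;".toList) = ['&','a','m','p',';'] from rfl,
        show ("<".toList) = ['<'] from rfl, show ("&lt;".toList) = ['&','l','t',';'] from rfl,
        show (">".toList) = ['>'] from rfl, show ("&gt;".toList) = ['&','g','t',';'] from rfl,
        show ("\r\n".toList) = ['\r','\n'] from rfl, show ("\n".toList) = ['\n'] from rfl]
    rw [replace_single, replace_single, replace_single, chain_esc, replace_crlf, crlf_of_esc]
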